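-- pv_equiv track=rewrite | github.com/takahiro-boobs/ayugram-bot | mail_service.py | parse_microsoft_notifications
-- ===== SOURCE A (Python) =====
-- from typing import Any, Dict, List, Optional
--
-- def parse_microsoft_notifications(payload: Any) -> List[Dict[str, Any]]:
--     if not isinstance(payload, dict):
--         return []
--     items = []
--     for item in list(payload.get("value") or []):
--         if not isinstance(item, dict):
--             continue
--         items.append(
--             {
--                 "subscription_id": str(item.get("subscriptionId") or "").strip(),
--                 "client_state": str(item.get("clientState") or "").strip(),
--                 "lifecycle_event": str(item.get("lifecycleEvent") or "").strip(),
--                 "change_type": str(item.get("changeType") or "").strip(),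
--                 "resource": str(item.get("resource") or "").strip(),
--             }
--         )
--     return items
-- ===== SOURCE B (Python) =====
-- def parse_microsoft_notifications(payload):
--     if not isinstance(payload, dict):
--         return []
--     records = [it for it in list(payload.get("value") or []) if isinstance(it, dict)]
--
--     def column(src):
--         # one pass over the records per schema field
--         return [str(it.get(src) or "").strip() for it in records]
--
--     subs = column("subscriptionId")
--     states = column("clientState")
--     events = column("lifecycleEvent")
--     changes = column("changeType")
--     resources = column("resource")
--     return [
--         {
--             "subscription_id": s,
--             "client_state": c,
--             "lifecycle_event": l,
--             "change_type": ch,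
--             "resource": r,
--         }
--         for s, c, l, ch, r in zip(subs, states, events, changes, resources)
--     ]
-- ===== Notes on version B (the rewrite author's own statement) =====
-- stated objective: alternative
-- what changed: Column-wise instead of row-wise: B extracts five per-field column lists in separate passes over the records and then zips the columns back into row dicts, instead of A's single accumulator loop that builds each row's five fields in place.
import Mathlib
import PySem

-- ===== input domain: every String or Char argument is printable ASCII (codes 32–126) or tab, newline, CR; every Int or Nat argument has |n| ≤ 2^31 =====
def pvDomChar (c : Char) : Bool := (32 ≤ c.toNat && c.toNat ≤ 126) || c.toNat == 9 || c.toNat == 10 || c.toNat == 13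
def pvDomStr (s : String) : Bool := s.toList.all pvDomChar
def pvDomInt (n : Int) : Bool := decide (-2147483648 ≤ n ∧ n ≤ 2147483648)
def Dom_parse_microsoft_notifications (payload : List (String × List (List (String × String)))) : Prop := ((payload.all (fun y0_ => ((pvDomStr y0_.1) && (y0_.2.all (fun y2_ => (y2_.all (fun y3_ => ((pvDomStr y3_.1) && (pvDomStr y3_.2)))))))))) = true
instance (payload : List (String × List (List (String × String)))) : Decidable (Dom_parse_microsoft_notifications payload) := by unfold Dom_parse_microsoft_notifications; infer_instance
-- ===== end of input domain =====

-- B is column-wise: it extracts one list per schema field in separate passes and zips them back into rows, instead of A's single row-building accumulator loop (alternative decomposition; same cost).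


-- ===== PORT A =====
-- `payload.get("value") or []` = getD with default [] (a present empty list also yields []);
-- `str(item.get(k) or "").strip()` on string values = strip of getD with default "".
-- Under this typing every item is a dict, so the `isinstance(item, dict)` guard is always true.
def parse_microsoft_notifications (payload : List (String × List (List (String × String)))) : List (List (String × String)) :=
  (PySem.Dict.getD (PySem.Dict.mk payload) "value" []).foldl
    (fun items item =>
      items ++ [[("subscription_id", PySem.Str.strip (PySem.Dict.getD (PySem.Dict.mk item) "subscriptionId" "")),
                 ("client_state", PySem.Str.strip (PySem.Dict.getD (PySem.Dict.mk item) "clientState" "")),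
                 ("lifecycle_event", PySem.Str.strip (PySem.Dict.getD (PySem.Dict.mk item) "lifecycleEvent" "")),
                 ("change_type", PySem.Str.strip (PySem.Dict.getD (PySem.Dict.mk item) "changeType" "")),
                 ("resource", PySem.Str.strip (PySem.Dict.getD (PySem.Dict.mk item) "resource" ""))]]) []

-- ===== PORT B =====
-- one pass over the records per schema field (Source B's `column`)
def pvColumn (src : String) (records : List (List (String × String))) : List String :=
  records.map (fun it => PySem.Str.strip (PySem.Dict.getD (PySem.Dict.mk it) src ""))

-- Python's zip of the five columns, each row rebuilt as a dict (Source B's final comprehension)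
def pvZipRows : List String → List String → List String → List String → List String → List (List (String × String))
  | s :: ss, c :: cs, l :: ls, ch :: chs, r :: rs =>
      [("subscription_id", s), ("client_state", c), ("lifecycle_event", l),
       ("change_type", ch), ("resource", r)] :: pvZipRows ss cs ls chs rs
  | _, _, _, _, _ => []

def parse_microsoft_notifications_alt (payload : List (String × List (List (String × String)))) : List (List (String × String)) :=
  let records := PySem.Dict.getD (PySem.Dict.mk payload) "value" []
  pvZipRows (pvColumn "subscriptionId" records) (pvColumn "clientState" records)
            (pvColumn "lifecycleEvent" records) (pvColumn "changeType" records)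
            (pvColumn "resource" records)

-- ===== PRECONDITION & SPEC =====
def Spec_parse_microsoft_notifications (payload : List (String × List (List (String × String)))) (out : List (List (String × String))) : Prop := out = parse_microsoft_notifications_alt payload
instance (payload : List (String × List (List (String × String)))) (out : List (List (String × String))) : Decidable (Spec_parse_microsoft_notifications payload out) := by unfold Spec_parse_microsoft_notifications; infer_instance

-- ===== CLAIM (what is proved, stated in full; the proofs are below) =====
def Claim_equal_parse_microsoft_notifications : Prop := ∀ (payload : List (String × List (List (String × String)))), Dom_parse_microsoft_notifications payload → Spec_parse_microsoft_notifications payload (parse_microsoft_notifications payload)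

-- ===== LEMMAS AND PROOFS =====
theorem pv_foldl_append_singleton {α β : Type} (f : α → β) (l : List α) (acc : List β) :
    l.foldl (fun items item => items ++ [f item]) acc = acc ++ l.map f := by
  induction l generalizing acc with
  | nil => simp
  | cons x xs ih => simp [List.foldl, ih, List.append_assoc]

-- zipping the five mapped columns recovers the row-wise map
theorem pv_zip_columns (records : List (List (String × String))) :
    pvZipRows (pvColumn "subscriptionId" records) (pvColumn "clientState" records)
              (pvColumn "lifecycleEvent" records) (pvColumn "changeType" records)
              (pvColumn "resource" records)
      = records.map (fun item =>
          [("subscription_id", PySem.Str.strip (PySem.Dict.getD (PySem.Dict.mk item) "subscriptionId" "")),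
           ("client_state", PySem.Str.strip (PySem.Dict.getD (PySem.Dict.mk item) "clientState" "")),
           ("lifecycle_event", PySem.Str.strip (PySem.Dict.getD (PySem.Dict.mk item) "lifecycleEvent" "")),
           ("change_type", PySem.Str.strip (PySem.Dict.getD (PySem.Dict.mk item) "changeType" "")),
           ("resource", PySem.Str.strip (PySem.Dict.getD (PySem.Dict.mk item) "resource" ""))]) := by
  induction records with
  | nil => rfl
  | cons x xs ih => simp [pvColumn, List.map] at ih ⊢; simpa [pvZipRows] using ih

-- ===== VERDICT (by name: the statement is the Claim_ definition above) =====
theorem parse_microsoft_notifications_spec : Claim_equal_parse_microsoft_notifications := by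
  intro payload _
  show _ = _
  unfold parse_microsoft_notifications parse_microsoft_notifications_alt
  rw [pv_foldl_append_singleton, pv_zip_columns, List.nil_append]
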